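-- pv_equiv track=rewrite | github.com/xemusila/codewars-solutions | two_beggars_and_a_gold_1.py | distribution_of
-- ===== SOURCE A (Python) =====
-- def distribution_of(golds):
--     sums = [0, 0]
--     while golds:
--         i = 0
--         while i < 2 and golds:
--             if golds[0] >= golds[-1]:
--                 sums[i] += golds[0]
--                 golds = golds[1:]
--             else:
--                 sums[i] += golds[-1]
--                 golds = golds[:-1]
--             i += 1
--     return sums
-- ===== SOURCE B (Python) =====
-- def distribution_of(golds):
--     # Two index pointers from both ends, alternating destination; no slicing.
--     sums = [0, 0]
--     lo, hi = 0, len(golds) - 1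
--     turn = 0
--     while lo <= hi:
--         if golds[lo] >= golds[hi]:
--             sums[turn] += golds[lo]
--             lo += 1
--         else:
--             sums[turn] += golds[hi]
--             hi -= 1
--         turn = 1 - turn
--     return sums
-- ===== Notes on version B (the rewrite author's own statement) =====
-- stated objective: faster
-- what changed: Replaced A's rebuild-by-slicing of the list on every pick with two index pointers walking inwards and an alternating destination index, so no list copies are made.
import Mathlib
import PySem

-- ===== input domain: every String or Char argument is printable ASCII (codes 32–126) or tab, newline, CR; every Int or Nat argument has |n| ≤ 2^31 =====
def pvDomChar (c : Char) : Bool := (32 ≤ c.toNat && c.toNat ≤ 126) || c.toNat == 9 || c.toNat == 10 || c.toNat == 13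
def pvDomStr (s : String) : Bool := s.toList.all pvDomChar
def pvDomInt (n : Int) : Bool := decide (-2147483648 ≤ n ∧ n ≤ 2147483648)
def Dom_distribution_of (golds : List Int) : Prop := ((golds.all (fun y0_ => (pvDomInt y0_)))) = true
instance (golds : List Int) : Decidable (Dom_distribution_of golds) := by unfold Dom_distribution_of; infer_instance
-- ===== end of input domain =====

-- B replaces A's rebuild-by-slicing of the list on every pick with two index pointers walking inwards (faster: asymptotic).


-- ===== PORT A =====
-- inner 'while i < 2 and golds' loop; the Nat argument is fuel only (2 suffices: the loop runs at
-- most twice per entry, and at fuel 0 the guard i < 2 would be false anyway); golds[0] is head,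
-- golds[-1] is getLast (golds is nonempty in those branches)
def pvInnerA : Nat → List Int → List Int → Int → List Int × List Int
  | 0, golds, sums, _ => (golds, sums)
  | n + 1, golds, sums, i =>
    if h : i < 2 ∧ golds ≠ [] then
      if golds.head h.2 ≥ golds.getLast h.2 then
        pvInnerA n golds.tail (sums.set i.toNat (sums.getD i.toNat 0 + golds.head h.2)) (i + 1)
      else
        pvInnerA n golds.dropLast (sums.set i.toNat (sums.getD i.toNat 0 + golds.getLast h.2)) (i + 1)
    else (golds, sums)

-- outer 'while golds' loop; fuel golds.length suffices (each inner pass removes at least one element)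
def pvOuterA : Nat → List Int → List Int → List Int
  | 0, _, sums => sums
  | n + 1, golds, sums =>
    if golds ≠ [] then
      pvOuterA n (pvInnerA 2 golds sums 0).1 (pvInnerA 2 golds sums 0).2
    else sums

def distribution_of (golds : List Int) : List Int :=
  pvOuterA golds.length golds [0, 0]

-- ===== PORT B =====
-- two pointers lo/hi walking inwards, alternating destination 'turn'; the Nat argument is fuel only
-- (golds.length suffices: the window hi - lo shrinks by one per step); indexed reads are always in
-- range while lo ≤ hi, so getD's default is never used
def pvAltLoop : Nat → List Int → Int → Int → Int → List Int → List Int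
  | 0, _, _, _, _, sums => sums
  | k + 1, golds, lo, hi, turn, sums =>
    if lo ≤ hi then
      if golds.getD lo.toNat 0 ≥ golds.getD hi.toNat 0 then
        pvAltLoop k golds (lo + 1) hi (1 - turn)
          (sums.set turn.toNat (sums.getD turn.toNat 0 + golds.getD lo.toNat 0))
      else
        pvAltLoop k golds lo (hi - 1) (1 - turn)
          (sums.set turn.toNat (sums.getD turn.toNat 0 + golds.getD hi.toNat 0))
    else sums

def distribution_of_alt (golds : List Int) : List Int :=
  pvAltLoop golds.length golds 0 ((golds.length : Int) - 1) 0 [0, 0]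

-- ===== PRECONDITION & SPEC =====
def Spec_distribution_of (golds : List Int) (out : List Int) : Prop := out = distribution_of_alt golds
instance (golds : List Int) (out : List Int) : Decidable (Spec_distribution_of golds out) := by unfold Spec_distribution_of; infer_instance

-- ===== CLAIM (what is proved, stated in full; the proofs are below) =====
def Claim_equal_distribution_of : Prop := ∀ (golds : List Int), Dom_distribution_of golds → Spec_distribution_of golds (distribution_of golds)

-- ===== LEMMAS AND PROOFS =====

theorem pvTailLt (g : List Int) (h : g ≠ []) : g.tail.length < g.length := by
  cases g with
  | nil => exact absurd rfl h
  | cons a t => simp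

theorem pvDropLastLt (g : List Int) (h : g ≠ []) : g.dropLast.length < g.length := by
  have := List.length_pos_iff.mpr h
  simp [List.length_dropLast]
  omega

-- reference single-step loop: one element taken per step, turn toggling 0,1,0,1,...
def pvRef (g : List Int) (t : Int) (sums : List Int) : List Int :=
  if h : g ≠ [] then
    if g.head h ≥ g.getLast h then
      pvRef g.tail (1 - t) (sums.set t.toNat (sums.getD t.toNat 0 + g.head h))
    else
      pvRef g.dropLast (1 - t) (sums.set t.toNat (sums.getD t.toNat 0 + g.getLast h))
  else sums
termination_by g.length
decreasing_by
  · exact pvTailLt g h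
  · exact pvDropLastLt g h

theorem pvOuterA_nil (n : Nat) (s : List Int) : pvOuterA n [] s = s := by
  cases n <;> simp [pvOuterA]

theorem pvOuterA_eq_ref : ∀ (n : Nat) (g s : List Int), g.length ≤ n →
    pvOuterA n g s = pvRef g 0 s := by
  intro n
  induction n with
  | zero =>
      intro g s hle
      have : g = [] := List.eq_nil_of_length_eq_zero (by omega)
      subst this
      simp [pvOuterA, pvRef]
  | succ n ih =>
      intro g s hle
      by_cases hg : g = []
      · subst hg; simp [pvOuterA, pvRef]
      · have hlen : 0 < g.length := List.length_pos_iff.mpr hg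
        -- after the first inner step (i = 0 → 1) on a strictly shorter list:
        have key : ∀ (g1 s1 : List Int), g1.length < g.length →
            pvOuterA n (pvInnerA 1 g1 s1 1).1 (pvInnerA 1 g1 s1 1).2 = pvRef g1 1 s1 := by
          intro g1 s1 hg1len
          by_cases hg1 : g1 = []
          · subst hg1
            rw [pvInnerA, dif_neg (by simp)]
            simp [pvOuterA_nil, pvRef]
          · rw [pvInnerA, dif_pos ⟨by norm_num, hg1⟩, pvRef, dif_pos hg1]
            have hlen1 : 0 < g1.length := List.length_pos_iff.mpr hg1
            by_cases hcmp : g1.head hg1 ≥ g1.getLast hg1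
            · rw [if_pos hcmp, if_pos hcmp]
              have := ih g1.tail (s1.set (Int.toNat 1) (s1.getD (Int.toNat 1) 0 + g1.head hg1))
                (by simp [List.length_tail]; omega)
              simpa [pvInnerA] using this
            · rw [if_neg hcmp, if_neg hcmp]
              have := ih g1.dropLast (s1.set (Int.toNat 1) (s1.getD (Int.toNat 1) 0 + g1.getLast hg1))
                (by simp [List.length_dropLast]; omega)
              simpa [pvInnerA] using this
        rw [pvOuterA, if_pos hg, pvInnerA, dif_pos ⟨by norm_num, hg⟩, pvRef, dif_pos hg]
        by_cases hcmp : g.head hg ≥ g.getLast hg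
        · rw [if_pos hcmp, if_pos hcmp]
          have := key g.tail (s.set (Int.toNat 0) (s.getD (Int.toNat 0) 0 + g.head hg))
            (by simp [List.length_tail]; omega)
          simpa using this
        · rw [if_neg hcmp, if_neg hcmp]
          have := key g.dropLast (s.set (Int.toNat 0) (s.getD (Int.toNat 0) 0 + g.getLast hg))
            (by simp [List.length_dropLast]; omega)
          simpa using this

-- the segment of g that B's pointers [lo, hi] still cover
def pvSeg (g : List Int) (lo hi : Int) : List Int :=
  (g.take (hi + 1).toNat).drop lo.toNat

theorem pvTake_dropLast (l : List Int) (m : Nat) (h : m ≤ l.length) :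
    (l.take m).dropLast = l.take (m - 1) := by
  rw [List.dropLast_eq_take, List.take_take]
  congr 1
  simp [List.length_take]
  omega

theorem pvAltLoop_eq_ref : ∀ (k : Nat) (g : List Int) (lo hi t : Int) (s : List Int),
    (hi + 1 - lo).toNat ≤ k → 0 ≤ lo → hi < (g.length : Int) →
    pvAltLoop k g lo hi t s = pvRef (pvSeg g lo hi) t s := by
  intro k
  induction k with
  | zero =>
      intro g lo hi t s hk hlo hhi
      rw [pvAltLoop]
      have hseg : pvSeg g lo hi = [] := by
        apply List.drop_eq_nil_of_le
        have : (g.take (hi + 1).toNat).length ≤ (hi + 1).toNat := by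
          simp [List.length_take]
        omega
      rw [hseg, pvRef]; simp
  | succ k ih =>
      intro g lo hi t s hk hlo hhi
      by_cases hle : lo ≤ hi
      · have hhi0 : 0 ≤ hi := by omega
        have hlt : lo.toNat < (g.take (hi + 1).toNat).length := by
          simp [List.length_take]; omega
        have hne : pvSeg g lo hi ≠ [] := by
          simp only [pvSeg, ne_eq, List.drop_eq_nil_iff]; omega
        have hseglen : (pvSeg g lo hi).length = (hi + 1).toNat - lo.toNat := by
          simp [pvSeg, List.length_take]; omega
        have hhead : (pvSeg g lo hi).head hne = g.getD lo.toNat 0 := by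
          rw [List.head_eq_getElem]
          simp only [pvSeg]
          rw [List.getElem_drop, List.getElem_take]
          rw [List.getD_eq_getElem]
          · simp
          · omega
        have hlast : (pvSeg g lo hi).getLast hne = g.getD hi.toNat 0 := by
          rw [List.getLast_eq_getElem]
          simp only [pvSeg, List.getElem_drop, List.getElem_take]
          rw [List.getD_eq_getElem _ _ (by omega)]
          apply getElem_congr rfl _ _
          simp [List.length_take, List.length_drop]
          omega
        rw [pvAltLoop, if_pos hle, pvRef, dif_pos hne, hhead, hlast]
        split
        · rw [ih g (lo + 1) hi (1 - t) _ (by omega) (by omega) hhi]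
          congr 1
          simp only [pvSeg, List.tail_drop]
          congr 1
          omega
        · rw [ih g lo (hi - 1) (1 - t) _ (by omega) hlo (by omega)]
          congr 1
          have e1 : pvSeg g lo hi = (g.drop lo.toNat).take ((hi + 1).toNat - lo.toNat) := by
            simp [pvSeg, List.drop_take]
          have e2 : pvSeg g lo (hi - 1) = (g.drop lo.toNat).take (hi.toNat - lo.toNat) := by
            simp only [pvSeg, List.drop_take]
            congr 2
            omega
          rw [e1, e2, pvTake_dropLast _ _ (by simp [List.length_drop]; omega)]
          congr 1
          omega
      · rw [pvAltLoop, if_neg hle]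
        have hseg : pvSeg g lo hi = [] := by
          apply List.drop_eq_nil_of_le
          have : (g.take (hi + 1).toNat).length ≤ (hi + 1).toNat := by
            simp [List.length_take]
          omega
        rw [hseg, pvRef]; simp

-- ===== VERDICT (by name: the statement is the Claim_ definition above) =====
theorem distribution_of_spec : Claim_equal_distribution_of := by
  intro golds _
  unfold Spec_distribution_of distribution_of distribution_of_alt
  rw [pvOuterA_eq_ref golds.length golds [0, 0] le_rfl]
  rw [pvAltLoop_eq_ref (golds.length) golds 0 ((golds.length : Int) - 1) 0 [0, 0]
        (by omega) (by omega) (by omega)]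
  congr 1
  simp [pvSeg]
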